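-- pv_equiv track=rewrite | github.com/PisekACMsi/pisek-skriptaNaloge | skripta.py | naredi_matriko
-- ===== SOURCE A (Python) =====
-- def naredi_matriko(n, m):
--     """Naredi matriko n x m, kjer so same enice"""
--     matrix = [[1] * m for _ in range(n)]
--     matrix_string = ""
--     max_element_length = len(str(max(matrix[i][j] for i in range(n) for j in range(m))))
--
--     for row in matrix:
--         row_string = "[{}]".format(", ".join("{:<{}}".format(element, max_element_length) for element in row))
--         matrix_string += "{}\n".format(row_string)
--
--     shifted_matrix_string = ""
--     lines = matrix_string.split('\n')
--     for i, line in enumerate(lines):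
--         line = line.strip()
--         shifted_matrix_string += 39 * " " + line + '\n'
--
--     return "[" + shifted_matrix_string.strip() + "\n" + 39 * " " + "]"
-- ===== SOURCE B (Python) =====
-- def naredi_matriko(n, m):
--     """Naredi matriko n x m, kjer so same enice"""
--     pad = 39 * " "
--     row = "[{}]".format(", ".join("1" for _ in range(m)))
--     return "[" + ("\n" + pad).join(row for _ in range(n)) + "\n" + pad + "]"
-- ===== Notes on version B (the rewrite author's own statement) =====
-- stated objective: simpler
-- what changed: B builds the single all-ones row string once and joins n copies with the ' '+39-space separator in one pass, instead of A's building an n*m matrix, computing a max element width, serializing row by row with quadratic += string concatenation, splitting on newlines, stripping and re-prefixing every line and re-stripping the result; Pre_ excludes n<1 or m<1, where A's max() over the empty element generator raises ValueError.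
import Mathlib
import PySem

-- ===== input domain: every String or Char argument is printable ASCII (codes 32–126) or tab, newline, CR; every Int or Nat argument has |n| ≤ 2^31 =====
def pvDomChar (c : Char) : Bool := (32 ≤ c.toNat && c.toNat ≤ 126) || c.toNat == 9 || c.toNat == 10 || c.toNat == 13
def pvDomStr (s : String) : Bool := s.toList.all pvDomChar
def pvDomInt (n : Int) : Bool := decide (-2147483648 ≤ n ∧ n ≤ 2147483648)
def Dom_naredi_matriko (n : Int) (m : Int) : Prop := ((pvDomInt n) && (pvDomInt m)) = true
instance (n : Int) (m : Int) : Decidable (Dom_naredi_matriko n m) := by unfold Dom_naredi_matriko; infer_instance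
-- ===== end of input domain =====

-- B builds the single all-ones row string once and joins n copies with the '\n'+39-space
-- separator directly, instead of A's build/serialize/split/strip/re-serialize round-trip;
-- objective: simpler.

-- "{:<{}}".format(e, w) on an int equals str(e) left-justified with spaces to width w;
-- exact hand port (PySem has no ljust).
def pvLjust (s : List Char) (w : Int) : List Char := s ++ List.replicate (w - s.length).toNat ' '

-- ===== PORT A =====
def naredi_matriko (n : Int) (m : Int) : String :=
  -- matrix = [[1] * m for _ in range(n)]
  let matrix : List (List Int) :=
    (PySem.List.pyRange 0 n 1).map (fun _ => PySem.List.pyRepeat [(1 : Int)] m)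
  -- max(matrix[i][j] for i in range(n) for j in range(m))
  let elems : List Int :=
    (PySem.List.pyRange 0 n 1).flatMap (fun i =>
      (PySem.List.pyRange 0 m 1).map (fun j =>
        PySem.List.pyGetD (PySem.List.pyGetD matrix i []) j 0))
  match PySem.List.max? elems (fun x => x) with
  | none => ""      -- max() over an empty generator: Python raises ValueError (excluded by Pre_)
  | some mx =>
    let max_element_length : Int := PySem.Str.len (PySem.Int.toStr mx)
    -- for row in matrix: matrix_string += "[{}]".format(", ".join(...)) + "\n"
    let matrix_string : List Char :=
      matrix.foldl (fun acc row =>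
        acc ++ (('[' :: PySem.Chars.join [',', ' ']
                  (row.map (fun e => pvLjust (PySem.Int.toStr e).toList max_element_length))
                ++ [']']) ++ ['\n'])) []
    -- lines = matrix_string.split('\n')
    let lines := PySem.Chars.splitOn matrix_string ['\n']
    -- for i, line in enumerate(lines): shifted += 39*" " + line.strip() + '\n'
    let shifted : List Char :=
      (PySem.List.enumerate lines 0).foldl (fun acc p =>
        acc ++ (List.replicate 39 ' ' ++ (PySem.Chars.strip p.2 ++ ['\n']))) []
    -- "[" + shifted.strip() + "\n" + 39*" " + "]"
    String.ofList ('[' :: PySem.Chars.strip shifted ++ '\n' :: List.replicate 39 ' ' ++ [']'])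

-- ===== PORT B =====
def naredi_matriko_alt (n : Int) (m : Int) : String :=
  -- pad = 39 * " "
  let pad : List Char := List.replicate 39 ' '
  -- row = "[{}]".format(", ".join("1" for _ in range(m)))
  let row : List Char :=
    '[' :: PySem.Chars.join [',', ' '] ((PySem.List.pyRange 0 m 1).map (fun _ => ['1'])) ++ [']']
  -- "[" + ("\n" + pad).join(row for _ in range(n)) + "\n" + pad + "]"
  String.ofList ('[' :: PySem.Chars.join ('\n' :: pad)
    ((PySem.List.pyRange 0 n 1).map (fun _ => row)) ++ '\n' :: pad ++ [']'])

-- ===== PRECONDITION & SPEC =====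
-- Pre_ excludes exactly n < 1 or m < 1: there the matrix is empty and A's max() raises ValueError.
def Pre_naredi_matriko (n : Int) (m : Int) : Prop := 1 ≤ n ∧ 1 ≤ m
instance (n : Int) (m : Int) : Decidable (Pre_naredi_matriko n m) := by unfold Pre_naredi_matriko; infer_instance
def pvWitness_naredi_matriko : Int × Int := (2, 3)

def Spec_naredi_matriko (n : Int) (m : Int) (out : String) : Prop := out = naredi_matriko_alt n m
instance (n : Int) (m : Int) (out : String) : Decidable (Spec_naredi_matriko n m out) := by unfold Spec_naredi_matriko; infer_instance

-- ===== CLAIM (what is proved, stated in full; the proofs are below) =====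
def Claim_equal_naredi_matriko : Prop := ∀ (n : Int) (m : Int), Dom_naredi_matriko n m → Pre_naredi_matriko n m → Spec_naredi_matriko n m (naredi_matriko n m)

-- ===== LEMMAS AND PROOFS =====

-- closed forms both ports are reduced to
def pvPad : List Char := List.replicate 39 ' '
def pvRow (M : Nat) : List Char := '[' :: (PySem.Chars.join [',', ' '] (List.replicate M ['1']) ++ [']'])
def pvCore (N M : Nat) : List Char := PySem.Chars.join ('\n' :: pvPad) (List.replicate N (pvRow M))
def pvOut (N M : Nat) : List Char := '[' :: pvCore N M ++ '\n' :: pvPad ++ [']']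

lemma pvRangeConst {α : Type} (n : Int) (h : 0 ≤ n) (a : α) :
    (PySem.List.pyRange 0 n 1).map (fun _ => a) = List.replicate n.toNat a := by
  have hn : n = ((n.toNat : Nat) : Int) := (Int.toNat_of_nonneg h).symm
  rw [hn, PySem.List.pyRange_zero_natCast, List.map_map]
  simp [Function.comp_def, List.map_const']
  omega

lemma pvMaxOne (xs : List Int) (h1 : ∀ x ∈ xs, x = 1) (h2 : xs ≠ []) :
    PySem.List.max? xs (fun x => x) = some 1 := by
  cases h : PySem.List.max? xs (fun x => x) with
  | none => exact absurd ((PySem.List.max?_eq_none_iff xs _).1 h) h2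
  | some v => rw [h1 v (PySem.List.max?_mem h)]

lemma pvEnumSnd {α : Type} : ∀ (xs : List α) (s : Int),
    (PySem.List.enumerate xs s).map Prod.snd = xs := by
  intro xs
  induction xs with
  | nil => intro s; simp [PySem.List.enumerate]
  | cons x t ih => intro s; simp [PySem.List.enumerate, ih]

lemma pvGoStep : ∀ (x : List Char), '\n' ∉ x → ∀ (f : Nat) (rest cur : List Char) (acc : List (List Char)),
    PySem.Chars.splitOn.go ['\n'] (x.length + 1 + f) (x ++ '\n' :: rest) cur acc
      = PySem.Chars.splitOn.go ['\n'] f rest [] ((cur.reverse ++ x) :: acc) := by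
  intro x
  induction x with
  | nil =>
    intro _ f rest cur acc
    have h1 : ([] : List Char).length + 1 + f = f + 1 := by simp [Nat.add_comm]
    rw [h1]
    rw [PySem.Chars.splitOn.go.eq_def]
    simp [List.isPrefixOf]
  | cons c t ih =>
    intro h f rest cur acc
    have hc : ('\n' == c) = false := by
      simp only [beq_eq_false_iff_ne]; intro hcc; exact h (by simp [hcc.symm])
    have h1 : (c :: t).length + 1 + f = (t.length + 1 + f) + 1 := by simp; omega
    rw [h1]
    rw [PySem.Chars.splitOn.go.eq_def]
    simp only [List.cons_append, List.isPrefixOf, hc, Bool.false_and, Bool.false_eq_true, if_false]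
    rw [ih (fun hm => h (List.mem_cons_of_mem _ hm)) f rest (c :: cur) acc]
    simp

lemma pvGoRep (R : List Char) (hR : '\n' ∉ R) :
    ∀ (N f : Nat) (acc : List (List Char)),
      PySem.Chars.splitOn.go ['\n'] (N * (R.length + 1) + 1 + f)
          (List.replicate N (R ++ ['\n'])).flatten [] acc
        = (([] : List Char) :: ((List.replicate N R).reverse ++ acc)).reverse := by
  intro N
  induction N with
  | zero =>
    intro f acc
    have h1 : 0 * (R.length + 1) + 1 + f = f + 1 := by omega
    rw [h1]
    rw [show (List.replicate 0 (R ++ ['\n'])).flatten = [] by simp]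
    rw [PySem.Chars.splitOn.go.eq_def]
    simp
  | succ K ih =>
    intro f acc
    have h1 : (K + 1) * (R.length + 1) + 1 + f = R.length + 1 + (K * (R.length + 1) + 1 + f) := by ring
    rw [h1]
    have h2 : (List.replicate (K + 1) (R ++ ['\n'])).flatten
        = R ++ '\n' :: (List.replicate K (R ++ ['\n'])).flatten := by
      simp [List.replicate_succ]
    rw [h2, pvGoStep R hR _ _ [] acc, ih]
    simp [List.replicate_succ]

lemma pvSplitRep (R : List Char) (hR : '\n' ∉ R) (N : Nat) :
    PySem.Chars.splitOn (List.replicate N (R ++ ['\n'])).flatten ['\n']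
      = List.replicate N R ++ [[]] := by
  unfold PySem.Chars.splitOn
  have hlen : ((List.replicate N (R ++ ['\n'])).flatten).length = N * (R.length + 1) := by
    simp [List.length_flatten, List.map_replicate, List.sum_replicate]
  have := pvGoRep R hR N 0 []
  rw [show N * (R.length + 1) + 1 + 0 = N * (R.length + 1) + 1 by omega] at this
  rw [hlen, this]
  simp

lemma pvDropSpaces : List.dropWhile PySem.Chars.isspace (List.replicate 39 ' ') = [] := by decide

lemma pvLstripPad (x : List Char) :
    PySem.Chars.lstrip (pvPad ++ x) = PySem.Chars.lstrip x := by
  simp only [PySem.Chars.lstrip, pvPad, List.dropWhile_append, pvDropSpaces,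
    List.isEmpty_nil, if_true]

lemma pvLstripBracket (x : List Char) : PySem.Chars.lstrip ('[' :: x) = '[' :: x := by
  simp [PySem.Chars.lstrip, show PySem.Chars.isspace '[' = false from by decide]

lemma pvRstripWs (x y : List Char) (hy : ∀ c ∈ y, PySem.Chars.isspace c = true) :
    PySem.Chars.rstrip (x ++ y) = PySem.Chars.rstrip x := by
  have h0 : List.dropWhile PySem.Chars.isspace y.reverse = [] :=
    List.dropWhile_eq_nil_iff.2 (fun c hc => hy c (List.mem_reverse.1 hc))
  simp [PySem.Chars.rstrip, List.reverse_append, List.dropWhile_append, h0]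

lemma pvRstripBracket (x : List Char) : PySem.Chars.rstrip (x ++ [']']) = x ++ [']'] := by
  simp [PySem.Chars.rstrip, List.reverse_append, show PySem.Chars.isspace ']' = false from by decide]

lemma pvJoinOnesMem (M : Nat) :
    ∀ c ∈ PySem.Chars.join [',', ' '] (List.replicate M ['1']), c = ',' ∨ c = ' ' ∨ c = '1' := by
  induction M with
  | zero => intro c hc; simp [PySem.Chars.join, List.intercalate] at hc
  | succ K ih =>
    intro c hc
    cases K with
    | zero =>
      rw [List.replicate_one, PySem.Chars.join_singleton] at hc
      have h1 : c = '1' := by simpa using hc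
      exact Or.inr (Or.inr h1)
    | succ J =>
      rw [show (List.replicate (J + 2) (['1'] : List Char)) = ['1'] :: ['1'] :: List.replicate J ['1']
            from by simp [List.replicate_succ],
          PySem.Chars.join_cons_cons,
          show (['1'] :: List.replicate J (['1'] : List Char)) = List.replicate (J + 1) ['1']
            from by simp [List.replicate_succ]] at hc
      rcases List.mem_append.1 hc with h | h
      · rcases List.mem_append.1 h with h | h
        · simp at h; tauto
        · simp at h; tauto
      · exact ih c h

lemma pvRowNoNl (M : Nat) : '\n' ∉ pvRow M := by
  intro h
  simp only [pvRow, List.mem_cons, List.mem_append] at h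
  rcases h with h | h | h
  · exact absurd h (by decide)
  · rcases pvJoinOnesMem M '\n' h with h' | h' | h' <;> exact absurd h' (by decide)
  · exact absurd h (by decide)

lemma pvCoreOne (M : Nat) : pvCore 1 M = pvRow M := by
  unfold pvCore
  rw [List.replicate_one, PySem.Chars.join_singleton]

lemma pvCoreSucc (K M : Nat) : pvCore (K + 2) M = pvRow M ++ ('\n' :: pvPad) ++ pvCore (K + 1) M := by
  unfold pvCore
  rw [show (List.replicate (K + 2) (pvRow M)) = pvRow M :: pvRow M :: List.replicate K (pvRow M)
        from by simp [List.replicate_succ],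
      PySem.Chars.join_cons_cons,
      show (pvRow M :: List.replicate K (pvRow M)) = List.replicate (K + 1) (pvRow M)
        from by simp [List.replicate_succ]]

lemma pvCoreCons (N M : Nat) : ∃ t, pvCore (N + 1) M = '[' :: t := by
  cases N with
  | zero =>
    exact ⟨PySem.Chars.join [',', ' '] (List.replicate M ['1']) ++ [']'],
      by rw [pvCoreOne, pvRow]⟩
  | succ K =>
    refine ⟨(PySem.Chars.join [',', ' '] (List.replicate M ['1']) ++ [']'])
        ++ ('\n' :: pvPad) ++ pvCore (K + 1) M, ?_⟩
    rw [pvCoreSucc, pvRow]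
    simp

lemma pvCoreEnd (N M : Nat) : ∃ z, pvCore (N + 1) M = z ++ [']'] := by
  induction N with
  | zero =>
    exact ⟨'[' :: PySem.Chars.join [',', ' '] (List.replicate M ['1']),
      by rw [pvCoreOne, pvRow]; simp⟩
  | succ K ih =>
    obtain ⟨z, hz⟩ := ih
    refine ⟨pvRow M ++ ('\n' :: pvPad) ++ z, ?_⟩
    rw [pvCoreSucc, hz]
    simp

lemma pvMyRep (K M : Nat) :
    (List.replicate (K + 1) (pvPad ++ (pvRow M ++ ['\n']))).flatten
      = pvPad ++ (pvCore (K + 1) M ++ ['\n']) := by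
  induction K with
  | zero => simp [pvCoreOne]
  | succ J ih =>
    rw [show List.replicate (J + 2) (pvPad ++ (pvRow M ++ ['\n']))
          = (pvPad ++ (pvRow M ++ ['\n'])) :: List.replicate (J + 1) (pvPad ++ (pvRow M ++ ['\n']))
        from by simp [List.replicate_succ]]
    rw [List.flatten_cons, ih, pvCoreSucc]
    simp

lemma pvStripRow (M : Nat) : PySem.Chars.strip (pvRow M) = pvRow M := by
  rw [PySem.Chars.strip, pvRow, pvLstripBracket,
      show ('[' :: (PySem.Chars.join [',', ' '] (List.replicate M ['1']) ++ [']']))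
          = ('[' :: PySem.Chars.join [',', ' '] (List.replicate M ['1'])) ++ [']'] from by simp,
      pvRstripBracket]

lemma pvStripShifted (N M : Nat) (hN : 1 ≤ N) :
    PySem.Chars.strip (pvPad ++ (pvCore N M ++ ['\n']) ++ (pvPad ++ ['\n'])) = pvCore N M := by
  obtain ⟨K, rfl⟩ : ∃ K, N = K + 1 := ⟨N - 1, by omega⟩
  rw [PySem.Chars.strip]
  rw [show pvPad ++ (pvCore (K + 1) M ++ ['\n']) ++ (pvPad ++ ['\n'])
        = pvPad ++ (pvCore (K + 1) M ++ ('\n' :: pvPad ++ ['\n'])) from by simp]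
  rw [pvLstripPad]
  obtain ⟨t, ht⟩ := pvCoreCons K M
  rw [show pvCore (K + 1) M ++ ('\n' :: pvPad ++ ['\n']) = '[' :: (t ++ ('\n' :: pvPad ++ ['\n']))
        from by rw [ht]; simp]
  rw [pvLstripBracket, ← List.cons_append, ← ht]
  rw [pvRstripWs _ _ (by
    intro c hc
    have : c = '\n' ∨ c = ' ' := by
      simp [pvPad] at hc
      tauto
    rcases this with rfl | rfl <;> decide)]
  obtain ⟨z, hz⟩ := pvCoreEnd K M
  rw [hz, pvRstripBracket]

lemma pvStripNil : PySem.Chars.strip [] = [] := rfl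

lemma pvFlatMapEnum {α β : Type} (xs : List α) (g : α → List β) :
    (PySem.List.enumerate xs 0).flatMap (fun p => g p.2) = xs.flatMap g := by
  conv_rhs => rw [← pvEnumSnd xs 0]
  rw [List.flatMap_map]

-- A reduces to the closed form
lemma pvA (n m : Int) (hn : 1 ≤ n) (hm : 1 ≤ m) :
    naredi_matriko n m = String.ofList (pvOut n.toNat m.toNat) := by
  have h0n : (0 : Int) ≤ n := by omega
  have h0m : (0 : Int) ≤ m := by omega
  have hmatrix : (PySem.List.pyRange 0 n 1).map (fun _ => PySem.List.pyRepeat [(1 : Int)] m)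
      = List.replicate n.toNat (List.replicate m.toNat (1 : Int)) := by
    rw [pvRangeConst n h0n, PySem.List.pyRepeat_singleton]
  simp only [naredi_matriko]
  rw [hmatrix]
  have hall : ∀ x ∈ (PySem.List.pyRange 0 n 1).flatMap (fun i =>
      (PySem.List.pyRange 0 m 1).map (fun j =>
        PySem.List.pyGetD (PySem.List.pyGetD
          (List.replicate n.toNat (List.replicate m.toNat (1 : Int))) i []) j 0)), x = 1 := by
    intro x hx
    simp only [List.mem_flatMap, List.mem_map] at hx
    obtain ⟨i, hi, j, hj, rfl⟩ := hx
    obtain ⟨hi0, hi1⟩ := PySem.List.mem_pyRange_one.1 hi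
    obtain ⟨hj0, hj1⟩ := PySem.List.mem_pyRange_one.1 hj
    rw [PySem.List.pyGetD_of_nonneg _ _ hi0,
        List.getD_replicate _ (show i.toNat < n.toNat by omega),
        PySem.List.pyGetD_of_nonneg _ _ hj0,
        List.getD_replicate _ (show j.toNat < m.toNat by omega)]
  have hne : (PySem.List.pyRange 0 n 1).flatMap (fun i =>
      (PySem.List.pyRange 0 m 1).map (fun j =>
        PySem.List.pyGetD (PySem.List.pyGetD
          (List.replicate n.toNat (List.replicate m.toNat (1 : Int))) i []) j 0)) ≠ [] := by
    intro hnil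
    have h0 : (0 : Int) ∈ PySem.List.pyRange 0 n 1 :=
      PySem.List.mem_pyRange_one.2 ⟨le_refl 0, by omega⟩
    have := List.flatMap_eq_nil_iff.1 hnil _ h0
    have hm0 : (0 : Int) ∈ PySem.List.pyRange 0 m 1 :=
      PySem.List.mem_pyRange_one.2 ⟨le_refl 0, by omega⟩
    rw [List.map_eq_nil_iff.1 this] at hm0
    exact absurd hm0 (List.not_mem_nil)
  rw [pvMaxOne _ hall hne]
  have hw : pvLjust (PySem.Int.toStr 1).toList (PySem.Str.len (PySem.Int.toStr 1)) = ['1'] := by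
    decide
  dsimp only
  rw [PySem.List.foldl_append_eq_flatMap _ (List.replicate n.toNat (List.replicate m.toNat (1 : Int))) ([] : List Char),
      List.flatMap_replicate]
  simp only [List.map_replicate, hw, List.nil_append]
  rw [show ('[' :: PySem.Chars.join [',', ' '] (List.replicate m.toNat ['1']) ++ [']'] ++ ['\n'])
        = pvRow m.toNat ++ ['\n'] from by simp [pvRow]]
  rw [pvSplitRep _ (pvRowNoNl m.toNat) n.toNat]
  rw [PySem.List.foldl_append_eq_flatMap]
  rw [pvFlatMapEnum (List.replicate n.toNat (pvRow m.toNat) ++ [[]])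
      (fun l => List.replicate 39 ' ' ++ (PySem.Chars.strip l ++ ['\n']))]
  rw [List.flatMap_append, List.flatMap_replicate]
  simp only [pvStripRow, pvStripNil, List.flatMap_cons, List.flatMap_nil,
    List.append_nil, List.nil_append]
  simp only [show List.replicate 39 ' ' = pvPad from rfl]
  obtain ⟨K, hK⟩ : ∃ K, n.toNat = K + 1 := ⟨n.toNat - 1, by omega⟩
  rw [hK, pvMyRep, pvStripShifted (K + 1) m.toNat (by omega)]
  rfl

-- B reduces to the closed form
lemma pvB (n m : Int) (hn : 0 ≤ n) (hm : 0 ≤ m) :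
    naredi_matriko_alt n m = String.ofList (pvOut n.toNat m.toNat) := by
  simp only [naredi_matriko_alt]
  rw [pvRangeConst m hm (['1'] : List Char)]
  rw [pvRangeConst n hn ('[' :: PySem.Chars.join [',', ' '] (List.replicate m.toNat ['1']) ++ [']'])]
  simp [pvOut, pvCore, pvRow, pvPad]

-- ===== VERDICT (by name: the statement is the Claim_ definition above) =====
theorem naredi_matriko_spec : Claim_equal_naredi_matriko := by
  intro n m _ hpre
  obtain ⟨h1, h2⟩ := hpre
  unfold Spec_naredi_matriko
  rw [pvA n m h1 h2, pvB n m (by omega) (by omega)]
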